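-- pv_equiv track=rewrite | github.com/tanmaik/AI | Unit 2/Sudoku/Sudoku_testing.py | get_most_constrained_var
-- ===== SOURCE A (Python) =====
-- def get_most_constrained_var(state):
--     constraints = [len(elem) for elem in state]
--     for x in range(2, 30):
--         try:
--             return constraints.index(x)
--         except:
--             continue
--     return None
-- ===== SOURCE B (Python) =====
-- def get_most_constrained_var(state):
--     best_idx = None
--     best_len = None
--     for i, elem in enumerate(state):
--         L = len(elem)
--         if 2 <= L <= 29 and (best_len is None or L < best_len):
--             best_idx = i
--             best_len = L
--     return best_idx
-- ===== Notes on version B (the rewrite author's own statement) =====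
-- stated objective: simpler
-- what changed: Replaced A's up-to-28 ascending value scans (constraints.index(x) for x in 2..29, via try/except) with one min-tracking enumerate pass over state; strict '<' keeps the first index of the smallest qualifying length.
import Mathlib
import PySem

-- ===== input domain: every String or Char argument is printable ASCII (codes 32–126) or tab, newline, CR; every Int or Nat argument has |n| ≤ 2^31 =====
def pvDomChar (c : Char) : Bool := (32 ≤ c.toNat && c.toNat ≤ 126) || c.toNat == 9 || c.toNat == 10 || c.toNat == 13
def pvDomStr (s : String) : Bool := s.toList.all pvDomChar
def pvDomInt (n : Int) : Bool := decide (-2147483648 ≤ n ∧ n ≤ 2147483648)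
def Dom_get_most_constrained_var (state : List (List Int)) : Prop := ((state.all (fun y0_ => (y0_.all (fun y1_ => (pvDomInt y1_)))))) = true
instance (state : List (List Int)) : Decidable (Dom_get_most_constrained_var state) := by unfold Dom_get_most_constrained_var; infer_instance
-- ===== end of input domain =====

-- B replaces A's up-to-28 ascending `constraints.index(x)` scans with one min-tracking pass (simpler).

-- ===== PORT A =====
-- the `for x in range(2, 30)` loop: each iteration tries constraints.index(x) and
-- returns on success (try/except with index's ValueError → Option via index?)
def goA_gmcv (constraints : List Int) : List Int → Option Int
  | [] => none
  | x :: xs =>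
    match PySem.List.index? constraints x with
    | some i => some (i : Int)
    | none => goA_gmcv constraints xs

def get_most_constrained_var (state : List (List Int)) : Option Int :=
  let constraints := state.map (fun elem => (elem.length : Int))
  goA_gmcv constraints (PySem.List.pyRange 2 30 1)

-- ===== PORT B =====
-- single enumerate pass; (best_idx, best_len) packed as Option (Int × Int)
def goB_gmcv : List (List Int) → Int → Option (Int × Int) → Option Int
  | [], _, best => best.map Prod.fst
  | elem :: rest, i, best =>
    let L : Int := elem.length
    let best' :=
      if (decide (2 ≤ L) && decide (L ≤ 29) &&
          (match best with | none => true | some (_, bl) => decide (L < bl))) = true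
      then some (i, L) else best
    goB_gmcv rest (i + 1) best'

def get_most_constrained_var_alt (state : List (List Int)) : Option Int :=
  goB_gmcv state 0 none

-- ===== PRECONDITION & SPEC =====
def Spec_get_most_constrained_var (state : List (List Int)) (out : Option Int) : Prop := out = get_most_constrained_var_alt state
instance (state : List (List Int)) (out : Option Int) : Decidable (Spec_get_most_constrained_var state out) := by unfold Spec_get_most_constrained_var; infer_instance

-- ===== CLAIM (what is proved, stated in full; the proofs are below) =====
def Claim_equal_get_most_constrained_var : Prop := ∀ (state : List (List Int)), Dom_get_most_constrained_var state → Spec_get_most_constrained_var state (get_most_constrained_var state)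

-- ===== LEMMAS AND PROOFS =====

-- bridge spec: first index (as Nat) of the minimum length in [2,29], with that length
def bestSpec : List Int → Option (Nat × Int)
  | [] => none
  | L :: ls =>
    let r := (bestSpec ls).map (fun p => (p.1 + 1, p.2))
    if 2 ≤ L ∧ L ≤ 29 then
      match r with
      | none => some (0, L)
      | some (j, m) => if L ≤ m then some (0, L) else some (j, m)
    else r

def combineB (i : Int) (best : Option (Int × Int)) (r : Option (Nat × Int)) : Option Int :=
  match best, r with
  | none, none => none
  | none, some (j, _) => some (i + (j : Int))
  | some (bi, _), none => some bi
  | some (bi, bm), some (j, m) => if m < bm then some (i + (j : Int)) else some bi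

theorem goB_char (es : List (List Int)) : ∀ (i : Int) (best : Option (Int × Int)),
    goB_gmcv es i best = combineB i best (bestSpec (es.map (fun e => (e.length : Int)))) := by
  induction es with
  | nil =>
    intro i best
    rcases best with _ | ⟨bi, bm⟩ <;> simp [goB_gmcv, bestSpec, combineB]
  | cons e rest ih =>
    intro i best
    simp only [goB_gmcv]
    rw [ih]
    simp only [List.map_cons, bestSpec]
    rcases best with _ | ⟨bi, bm⟩ <;>
      rcases hr : bestSpec (rest.map (fun e => (e.length : Int))) with _ | ⟨j, m⟩ <;>
      simp only [hr, Option.map_some, Option.map_none, Bool.and_eq_true, decide_eq_true_eq] <;>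
      split_ifs <;>
      simp_all [combineB] <;>
      first
        | omega
        | (split_ifs <;> simp_all <;> omega)

theorem bestSpec_none {cs : List Int} (h : bestSpec cs = none) :
    ∀ L ∈ cs, ¬(2 ≤ L ∧ L ≤ 29) := by
  induction cs with
  | nil => simp
  | cons L ls ih =>
    rw [bestSpec] at h
    rcases hb : bestSpec ls with _ | ⟨j, m'⟩ <;> rw [hb] at h <;>
      simp only [Option.map_some, Option.map_none] at h
    · split_ifs at h with hq
      intro x hx
      rcases List.mem_cons.1 hx with rfl | hx
      · exact hq
      · exact ih hb x hx
    · split_ifs at h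

theorem bestSpec_some : ∀ {cs : List Int} {i : Nat} {m : Int},
    bestSpec cs = some (i, m) →
    (2 ≤ m ∧ m ≤ 29) ∧ PySem.List.index? cs m = some i ∧
      ∀ L ∈ cs, 2 ≤ L → L ≤ 29 → m ≤ L := by
  intro cs
  induction cs with
  | nil => intro i m h; simp [bestSpec] at h
  | cons L ls ih =>
    intro i m h
    rw [bestSpec] at h
    rcases hb : bestSpec ls with _ | ⟨j, m'⟩ <;> rw [hb] at h <;>
      simp only [Option.map_some, Option.map_none] at h
    · -- no qualifying element in ls
      split_ifs at h with hq
      injection h with h1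
      injection h1 with hi hm
      subst hm; subst hi
      refine ⟨hq, PySem.List.index?_cons_self .., ?_⟩
      intro x hx h2 h3
      rcases List.mem_cons.1 hx with rfl | hx
      · exact le_refl x
      · exact absurd ⟨h2, h3⟩ (bestSpec_none hb x hx)
    · obtain ⟨hm', hidx, hmin⟩ := ih hb
      split_ifs at h with hq hle
      · -- qual L, L ≤ m' : result (0, L)
        injection h with h1
        injection h1 with hi hm
        subst hm; subst hi
        refine ⟨hq, PySem.List.index?_cons_self .., ?_⟩
        intro x hx h2 h3
        rcases List.mem_cons.1 hx with rfl | hx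
        · exact le_refl x
        · exact le_trans hle (hmin x hx h2 h3)
      · -- qual L, m' < L : result (j+1, m')
        injection h with h1
        injection h1 with hi hm
        subst hm; subst hi
        have hne : L ≠ m' := by omega
        refine ⟨hm', ?_, ?_⟩
        · rw [PySem.List.index?_cons_of_ne ls hne, hidx]; rfl
        · intro x hx h2 h3
          rcases List.mem_cons.1 hx with rfl | hx
          · omega
          · exact hmin x hx h2 h3
      · -- ¬qual L : shifted result
        injection h with h1
        injection h1 with hi hm
        subst hm; subst hi
        have hne : L ≠ m' := by omega
        refine ⟨hm', ?_, ?_⟩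
        · rw [PySem.List.index?_cons_of_ne ls hne, hidx]; rfl
        · intro x hx h2 h3
          rcases List.mem_cons.1 hx with rfl | hx
          · omega
          · exact hmin x hx h2 h3

theorem goA_none (cs : List Int) (xs : List Int) (h : ∀ x ∈ xs, x ∉ cs) :
    goA_gmcv cs xs = none := by
  induction xs with
  | nil => rfl
  | cons x xs ih =>
    rw [goA_gmcv]
    rw [(PySem.List.index?_eq_none_iff cs x).2 (h x List.mem_cons_self)]
    exact ih (fun y hy => h y (List.mem_cons_of_mem _ hy))

theorem goA_some (cs : List Int) (m : Int) (i : Nat) :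
    ∀ xs : List Int, List.Pairwise (· < ·) xs → m ∈ xs →
    (∀ x ∈ xs, x < m → x ∉ cs) → PySem.List.index? cs m = some i →
    goA_gmcv cs xs = some (i : Int) := by
  intro xs
  induction xs with
  | nil => simp
  | cons x xs ih =>
    intro hpw hm hlt hidx
    rw [goA_gmcv]
    by_cases hxm : x = m
    · subst hxm
      rw [hidx]
    · have hmx : m ∈ xs := by
        rcases List.mem_cons.1 hm with rfl | h
        · exact absurd rfl hxm
        · exact h
      have hxltm : x < m := (List.pairwise_cons.1 hpw).1 m hmx
      rw [(PySem.List.index?_eq_none_iff cs x).2 (hlt x List.mem_cons_self hxltm)]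
      exact ih (List.pairwise_cons.1 hpw).2 hmx
        (fun y hy => hlt y (List.mem_cons_of_mem _ hy)) hidx

-- ===== VERDICT (by name: the statement is the Claim_ definition above) =====
theorem get_most_constrained_var_spec : Claim_equal_get_most_constrained_var := by
  intro state _
  unfold Spec_get_most_constrained_var get_most_constrained_var get_most_constrained_var_alt
  rw [goB_char]
  set cs : List Int := state.map (fun e => (e.length : Int)) with hcs
  rcases hb : bestSpec cs with _ | ⟨j, m⟩
  · rw [goA_none cs _ (fun x hx hxc => ?_)]
    · simp [combineB]
    · have := (PySem.List.mem_pyRange_one (a := 2) (b := 30)).1 hx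
      exact bestSpec_none hb x hxc (by omega)
  · obtain ⟨hm, hidx, hmin⟩ := bestSpec_some hb
    rw [goA_some cs m j _ (PySem.List.pairwise_lt_pyRange_one 2 30)
        ((PySem.List.mem_pyRange_one (a := 2) (b := 30)).2 (by omega))
        (fun x hx hxm hxc => ?_) hidx]
    · simp [combineB]
    · have hr := (PySem.List.mem_pyRange_one (a := 2) (b := 30)).1 hx
      have := hmin x hxc (by omega) (by omega)
      omega
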